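-- pv_equiv track=rewrite | github.com/berba-q/brief_gpt | utils/prompt_templates.py | _fallback_theme_detection
-- ===== SOURCE A (Python) =====
-- def _fallback_theme_detection(dataset_name: str) -> str:
--     """Fallback theme detection based on dataset name."""
--
--     name_lower = dataset_name.lower()
--
--     if any(word in name_lower for word in ['crop', 'livestock', 'production', 'yield']):
--         return 'production and crops'
--     elif any(word in name_lower for word in ['trade', 'import', 'export']):
--         return 'trade and markets'
--     elif any(word in name_lower for word in ['food', 'nutrition', 'security']):
--         return 'food security and nutrition'
--     elif any(word in name_lower for word in ['emission', 'environment', 'climate']):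
--         return 'environment and sustainability'
--     elif any(word in name_lower for word in ['fertilizer', 'input', 'resource']):
--         return 'inputs and resources'
--     else:
--         return 'agricultural data analysis'
-- ===== SOURCE B (Python) =====
-- # B: single flat pass with a min-priority accumulator over keyword->priority map,
-- # then index into the theme list; replaces the per-group elif ladder.
-- _KEYWORD_PRIORITY = {
--     'crop': 0, 'livestock': 0, 'production': 0, 'yield': 0,
--     'trade': 1, 'import': 1, 'export': 1,
--     'food': 2, 'nutrition': 2, 'security': 2,
--     'emission': 3, 'environment': 3, 'climate': 3,
--     'fertilizer': 4, 'input': 4, 'resource': 4,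
-- }
-- _THEMES = [
--     'production and crops',
--     'trade and markets',
--     'food security and nutrition',
--     'environment and sustainability',
--     'inputs and resources',
--     'agricultural data analysis',
-- ]
--
-- def _fallback_theme_detection(dataset_name: str) -> str:
--     """Fallback theme detection: lowest matching keyword priority wins."""
--     name_lower = dataset_name.lower()
--     best = len(_THEMES) - 1
--     for word, pri in _KEYWORD_PRIORITY.items():
--         if pri < best and word in name_lower:
--             best = pri
--     return _THEMES[best]
-- ===== Notes on version B (the rewrite author's own statement) =====
-- stated objective: alternative
-- what changed: Replaced the five-branch elif ladder of group any-tests by one flat pass over a keyword-to-priority map keeping a min-priority accumulator, then a single index into a theme array; lowest matched priority equals the ladder's first match.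
import Mathlib
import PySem

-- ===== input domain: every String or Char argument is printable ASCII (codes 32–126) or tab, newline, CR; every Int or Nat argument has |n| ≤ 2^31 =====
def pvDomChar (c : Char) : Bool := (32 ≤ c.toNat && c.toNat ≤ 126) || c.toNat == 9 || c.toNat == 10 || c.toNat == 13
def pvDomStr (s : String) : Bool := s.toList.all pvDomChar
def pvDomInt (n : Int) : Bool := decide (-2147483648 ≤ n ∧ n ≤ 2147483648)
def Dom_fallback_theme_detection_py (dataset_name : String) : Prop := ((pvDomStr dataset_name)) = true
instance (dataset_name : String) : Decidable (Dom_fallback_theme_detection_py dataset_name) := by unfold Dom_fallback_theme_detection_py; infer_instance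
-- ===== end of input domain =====

-- B: one flat pass over a keyword->priority map with a min-priority accumulator, then index into a theme array; objective: alternative decomposition.
-- ===== PORT A =====
def fallback_theme_detection_py (dataset_name : String) : String :=
  let name_lower := PySem.Str.lower dataset_name
  if ["crop", "livestock", "production", "yield"].any (fun word => PySem.Str.isIn word name_lower) then
    "production and crops"
  else if ["trade", "import", "export"].any (fun word => PySem.Str.isIn word name_lower) then
    "trade and markets"
  else if ["food", "nutrition", "security"].any (fun word => PySem.Str.isIn word name_lower) then
    "food security and nutrition"
  else if ["emission", "environment", "climate"].any (fun word => PySem.Str.isIn word name_lower) then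
    "environment and sustainability"
  else if ["fertilizer", "input", "resource"].any (fun word => PySem.Str.isIn word name_lower) then
    "inputs and resources"
  else
    "agricultural data analysis"

-- ===== PORT B =====
-- the dict _KEYWORD_PRIORITY as an association list in insertion order
def keywordPriority : List (String × Nat) :=
  [("crop", 0), ("livestock", 0), ("production", 0), ("yield", 0),
   ("trade", 1), ("import", 1), ("export", 1),
   ("food", 2), ("nutrition", 2), ("security", 2),
   ("emission", 3), ("environment", 3), ("climate", 3),
   ("fertilizer", 4), ("input", 4), ("resource", 4)]

def themes : List String :=
  ["production and crops", "trade and markets", "food security and nutrition",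
   "environment and sustainability", "inputs and resources", "agricultural data analysis"]

-- loop body of B: keep the smallest priority whose keyword occurs in name_lower
def bestStep (name_lower : String) (best : Nat) (wp : String × Nat) : Nat :=
  if wp.2 < best ∧ PySem.Str.isIn wp.1 name_lower then wp.2 else best

def fallback_theme_detection_py_alt (dataset_name : String) : String :=
  let name_lower := PySem.Str.lower dataset_name
  let best := keywordPriority.foldl (bestStep name_lower) (themes.length - 1)
  themes.getD best "agricultural data analysis"

-- ===== PRECONDITION & SPEC =====
def Spec_fallback_theme_detection_py (dataset_name : String) (out : String) : Prop := out = fallback_theme_detection_py_alt dataset_name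
instance (dataset_name : String) (out : String) : Decidable (Spec_fallback_theme_detection_py dataset_name out) := by unfold Spec_fallback_theme_detection_py; infer_instance

-- ===== CLAIM (what is proved, stated in full; the proofs are below) =====
def Claim_equal_fallback_theme_detection_py : Prop := ∀ (dataset_name : String), Dom_fallback_theme_detection_py dataset_name → Spec_fallback_theme_detection_py dataset_name (fallback_theme_detection_py dataset_name)

-- ===== LEMMAS AND PROOFS =====

-- folding one constant-priority block: p if it improves the accumulator and a keyword matches
theorem foldl_bestStep_block (nl : String) (p : Nat) (ws : List String) (b : Nat) :
    (ws.map (fun w => (w, p))).foldl (bestStep nl) b =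
      if p < b ∧ ws.any (fun w => PySem.Str.isIn w nl) then p else b := by
  induction ws generalizing b with
  | nil => simp
  | cons w ws ih =>
    simp only [List.map_cons, List.foldl_cons, List.any_cons, bestStep, ih, PySem.Str.isIn_eq]
    by_cases hw : PySem.Chars.isIn w.toList nl.toList = true <;> by_cases hp : p < b <;>
      simp [hw, hp]

-- keywordPriority is the concatenation of the five constant-priority blocks
theorem keywordPriority_blocks :
    keywordPriority =
      (["crop", "livestock", "production", "yield"].map (fun w => (w, 0)))
      ++ (["trade", "import", "export"].map (fun w => (w, 1)))
      ++ (["food", "nutrition", "security"].map (fun w => (w, 2)))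
      ++ (["emission", "environment", "climate"].map (fun w => (w, 3)))
      ++ (["fertilizer", "input", "resource"].map (fun w => (w, 4))) := rfl

-- ===== VERDICT (by name: the statement is the Claim_ definition above) =====
theorem fallback_theme_detection_py_spec : Claim_equal_fallback_theme_detection_py := by
  intro s _
  unfold Spec_fallback_theme_detection_py fallback_theme_detection_py fallback_theme_detection_py_alt
  set nl := PySem.Str.lower s with hnl
  rw [keywordPriority_blocks]
  simp only [List.foldl_append, foldl_bestStep_block]
  by_cases g0 : (["crop", "livestock", "production", "yield"].any (fun w => PySem.Str.isIn w nl)) = true <;>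
  by_cases g1 : (["trade", "import", "export"].any (fun w => PySem.Str.isIn w nl)) = true <;>
  by_cases g2 : (["food", "nutrition", "security"].any (fun w => PySem.Str.isIn w nl)) = true <;>
  by_cases g3 : (["emission", "environment", "climate"].any (fun w => PySem.Str.isIn w nl)) = true <;>
  by_cases g4 : (["fertilizer", "input", "resource"].any (fun w => PySem.Str.isIn w nl)) = true <;>
    simp_all [themes]
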